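-- pv_equiv track=rewrite | github.com/python/cpython | Tools/clinic/libclinic/formatting.py | wrap_declarations
-- ===== SOURCE A (Python) =====
-- def wrap_declarations(text: str, length: int = 78) -> str:
--     """
--     A simple-minded text wrapper for C function declarations.
--
--     It views a declaration line as looking like this:
--         xxxxxxxx(xxxxxxxxx,xxxxxxxxx)
--     If called with length=30, it would wrap that line into
--         xxxxxxxx(xxxxxxxxx,
--                  xxxxxxxxx)
--     (If the declaration has zero or one parameters, this
--     function won't wrap it.)
--
--     If this doesn't work properly, it's probably better to
--     start from scratch with a more sophisticated algorithm,
--     rather than try and improve/debug this dumb little function.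
--     """
--     lines = []
--     for line in text.split("\n"):
--         prefix, _, after_l_paren = line.partition("(")
--         if not after_l_paren:
--             lines.append(line)
--             continue
--         in_paren, _, after_r_paren = after_l_paren.partition(")")
--         if not _:
--             lines.append(line)
--             continue
--         if "," not in in_paren:
--             lines.append(line)
--             continue
--         parameters = [x.strip() + ", " for x in in_paren.split(",")]
--         prefix += "("
--         if len(prefix) < length:
--             spaces = " " * len(prefix)
--         else:
--             spaces = " " * 4
--
--         while parameters:
--             line = prefix
--             first = True
--             while parameters:
--                 if not first and (len(line) + len(parameters[0]) > length):
--                     break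
--                 line += parameters.pop(0)
--                 first = False
--             if not parameters:
--                 line = line.rstrip(", ") + ")" + after_r_paren
--             lines.append(line.rstrip())
--             prefix = spaces
--     return "\n".join(lines)
-- ===== SOURCE B (Python) =====
-- def wrap_declarations(text: str, length: int = 78) -> str:
--     """Wrap C function declarations at parameter commas (single forward
--     pass over the parameter tokens instead of nested destructive loops)."""
--     lines = []
--     for line in text.split("\n"):
--         prefix, _, after_l_paren = line.partition("(")
--         if not after_l_paren:
--             lines.append(line)
--             continue
--         in_paren, _, after_r_paren = after_l_paren.partition(")")
--         if not _:
--             lines.append(line)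
--             continue
--         if "," not in in_paren:
--             lines.append(line)
--             continue
--         prefix += "("
--         spaces = " " * len(prefix) if len(prefix) < length else " " * 4
--         cur = prefix
--         empty = True
--         for param in in_paren.split(","):
--             token = param.strip() + ", "
--             if not empty and len(cur) + len(token) > length:
--                 lines.append(cur.rstrip())
--                 cur = spaces
--             cur += token
--             empty = False
--         lines.append((cur.rstrip(", ") + ")" + after_r_paren).rstrip())
--     return "\n".join(lines)
-- ===== Notes on version B (the rewrite author's own statement) =====
-- stated objective: simpler
-- what changed: Replaces A's nested while loops that destructively pop(0) from the parameter list and rebuild lines around a first-token flag with a single forward accumulation pass over the parameter tokens (current line + empty flag, flush on overflow).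
import Mathlib
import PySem

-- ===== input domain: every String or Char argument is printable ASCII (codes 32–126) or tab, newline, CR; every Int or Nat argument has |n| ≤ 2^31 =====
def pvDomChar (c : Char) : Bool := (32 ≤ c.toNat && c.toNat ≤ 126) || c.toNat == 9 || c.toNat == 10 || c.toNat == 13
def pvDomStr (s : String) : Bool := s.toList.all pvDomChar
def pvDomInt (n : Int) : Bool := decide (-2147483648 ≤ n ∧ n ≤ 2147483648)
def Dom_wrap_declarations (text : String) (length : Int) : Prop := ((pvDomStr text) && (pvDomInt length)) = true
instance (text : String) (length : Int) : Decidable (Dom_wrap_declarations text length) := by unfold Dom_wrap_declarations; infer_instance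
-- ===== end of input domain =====

-- B replaces A's nested destructive while/pop(0) loops by one forward accumulation
-- pass over the parameter tokens (objective: simpler decomposition, same greedy result).

-- shared exact primitives (both Pythons use the same built-ins):
-- str.partition with a single-character separator: (before, found?, after)
def pvPartCh (cs : List Char) (c : Char) : List Char × Bool × List Char :=
  match cs with
  | [] => ([], false, [])
  | x :: xs =>
    if x == c then ([], true, xs)
    else
      let r := pvPartCh xs c
      (x :: r.1, r.2.1, r.2.2)

-- s.rstrip(", "): drop ',' and ' ' from the right end
def pvRstripCS (cs : List Char) : List Char :=
  (cs.reverse.dropWhile (fun c => c == ',' || c == ' ')).reverse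

-- x.strip() + ", " applied to one parameter piece
def pvTok (x : List Char) : List Char := PySem.Chars.strip x ++ [',', ' ']

-- ===== PORT A =====
-- inner 'while parameters:' loop after the unconditional first token:
-- consume tokens while they fit, return (line, leftover parameters)
def wrapA_inner (length : Int) (line : List Char) (ps : List (List Char)) :
    List Char × List (List Char) :=
  match ps with
  | [] => (line, [])
  | p :: rest =>
    if ((line.length : Int) + (p.length : Int) > length) then (line, p :: rest)
    else wrapA_inner length (line ++ p) rest

theorem wrapA_inner_len (length : Int) (line : List Char) (ps : List (List Char)) :
    (wrapA_inner length line ps).2.length ≤ ps.length := by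
  induction ps generalizing line with
  | nil => simp [wrapA_inner]
  | cons p rest ih =>
    simp only [wrapA_inner]
    split
    · simp
    · exact le_trans (ih _) (Nat.le_succ _)

-- outer 'while parameters:' loop
def wrapA_outer (length : Int) (spaces afterR : List Char)
    (pfx : List Char) (ps : List (List Char)) (acc : List (List Char)) :
    List (List Char) :=
  match ps with
  | [] => acc
  | p :: rest =>
    let r := wrapA_inner length (pfx ++ p) rest
    if r.2 = [] then
      acc ++ [PySem.Chars.rstrip (pvRstripCS r.1 ++ [')'] ++ afterR)]
    else
      wrapA_outer length spaces afterR spaces r.2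
        (acc ++ [PySem.Chars.rstrip r.1])
termination_by ps.length
decreasing_by
  have := wrapA_inner_len length (pfx ++ p) rest
  simp only [List.length_cons]
  omega

-- one iteration of A's 'for line in text.split("\n")' body (the lines it appends)
def wrapA_line (length : Int) (line : List Char) : List (List Char) :=
  let p1 := pvPartCh line '('
  if p1.2.2 = [] then [line]
  else
    let p2 := pvPartCh p1.2.2 ')'
    if p2.2.1 = false then [line]
    else if PySem.Chars.isIn [','] p2.1 = false then [line]
    else
      let ps := (PySem.Chars.splitOn p2.1 [',']).map pvTok
      let pfx := p1.1 ++ ['(']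
      let spaces :=
        if (pfx.length : Int) < length then List.replicate pfx.length ' '
        else List.replicate 4 ' '
      wrapA_outer length spaces p2.2.2 pfx ps []

def wrap_declarations (text : String) (length : Int) : String :=
  let lines :=
    (PySem.Chars.splitOn text.toList ['\n']).foldl
      (fun acc line => acc ++ wrapA_line length line) []
  String.ofList (PySem.Chars.join ['\n'] lines)

-- ===== PORT B =====
-- one step of B's single forward pass: state (lines, cur, empty)
def wrapB_step (length : Int) (spaces : List Char)
    (st : List (List Char) × List Char × Bool) (param : List Char) :
    List (List Char) × List Char × Bool :=
  let token := pvTok param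
  if st.2.2 = false ∧ ((st.2.1.length : Int) + (token.length : Int) > length) then
    (st.1 ++ [PySem.Chars.rstrip st.2.1], spaces ++ token, false)
  else
    (st.1, st.2.1 ++ token, false)

-- one iteration of B's outer loop body (the lines it appends)
def wrapB_line (length : Int) (line : List Char) : List (List Char) :=
  let p1 := pvPartCh line '('
  if p1.2.2 = [] then [line]
  else
    let p2 := pvPartCh p1.2.2 ')'
    if p2.2.1 = false then [line]
    else if PySem.Chars.isIn [','] p2.1 = false then [line]
    else
      let pfx := p1.1 ++ ['(']
      let spaces :=
        if (pfx.length : Int) < length then List.replicate pfx.length ' '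
        else List.replicate 4 ' '
      let st := (PySem.Chars.splitOn p2.1 [',']).foldl
        (wrapB_step length spaces) ([], pfx, true)
      st.1 ++ [PySem.Chars.rstrip (pvRstripCS st.2.1 ++ [')'] ++ p2.2.2)]

def wrap_declarations_alt (text : String) (length : Int) : String :=
  let lines :=
    (PySem.Chars.splitOn text.toList ['\n']).foldl
      (fun acc line => acc ++ wrapB_line length line) []
  String.ofList (PySem.Chars.join ['\n'] lines)

-- ===== PRECONDITION & SPEC =====
def Spec_wrap_declarations (text : String) (length : Int) (out : String) : Prop := out = wrap_declarations_alt text length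
instance (text : String) (length : Int) (out : String) : Decidable (Spec_wrap_declarations text length out) := by unfold Spec_wrap_declarations; infer_instance

-- ===== CLAIM (what is proved, stated in full; the proofs are below) =====
def Claim_equal_wrap_declarations : Prop := ∀ (text : String) (length : Int), Dom_wrap_declarations text length → Spec_wrap_declarations text length (wrap_declarations text length)

-- ===== LEMMAS AND PROOFS =====

-- wrapB_step with the token precomputed (B strips inside the loop; this factors it out)
def wrapB_step' (length : Int) (spaces : List Char)
    (st : List (List Char) × List Char × Bool) (token : List Char) :
    List (List Char) × List Char × Bool :=
  if st.2.2 = false ∧ ((st.2.1.length : Int) + (token.length : Int) > length) then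
    (st.1 ++ [PySem.Chars.rstrip st.2.1], spaces ++ token, false)
  else
    (st.1, st.2.1 ++ token, false)

-- B's fold from a non-empty current line, expressed through A's inner loop
theorem wrapB_fold_of_inner (length : Int) (spaces : List Char)
    (ps : List (List Char)) (line : List Char) (acc : List (List Char)) :
    ps.foldl (wrapB_step' length spaces) (acc, line, false) =
      (if (wrapA_inner length line ps).2 = []
       then (acc, (wrapA_inner length line ps).1, false)
       else (wrapA_inner length line ps).2.foldl
          (wrapB_step' length spaces)
          (acc ++ [PySem.Chars.rstrip (wrapA_inner length line ps).1], spaces, true)) := by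
  induction ps generalizing line acc with
  | nil => simp [wrapA_inner]
  | cons p rest ih =>
    by_cases hov : ((line.length : Int) + (p.length : Int) > length)
    · have hA : wrapA_inner length line (p :: rest) = (line, p :: rest) := by
        simp only [wrapA_inner, if_pos hov]
      rw [hA]
      have h1 : wrapB_step' length spaces (acc, line, false) p
          = (acc ++ [PySem.Chars.rstrip line], spaces ++ p, false) := by
        simp [wrapB_step', hov]
      have h2 : wrapB_step' length spaces (acc ++ [PySem.Chars.rstrip line], spaces, true) p
          = (acc ++ [PySem.Chars.rstrip line], spaces ++ p, false) := by
        simp [wrapB_step']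
      rw [List.foldl_cons, h1, if_neg (by simp), List.foldl_cons, h2]
    · have hA : wrapA_inner length line (p :: rest) = wrapA_inner length (line ++ p) rest := by
        simp only [wrapA_inner, if_neg hov]
      have hstep : wrapB_step' length spaces (acc, line, false) p
          = (acc, line ++ p, false) := by
        simp [wrapB_step', hov]
      rw [hA, List.foldl_cons, hstep]
      exact ih (line ++ p) acc

-- the finalisation both programs perform on the last line
def pvFinal (afterR cur : List Char) : List Char :=
  PySem.Chars.rstrip (pvRstripCS cur ++ [')'] ++ afterR)

-- A's outer loop equals B's single pass followed by the finalisation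
theorem wrapAB_core (length : Int) (spaces afterR : List Char) :
    ∀ (n : ℕ) (ps : List (List Char)), ps.length ≤ n → ps ≠ [] →
    ∀ (pfx : List Char) (acc : List (List Char)),
    wrapA_outer length spaces afterR pfx ps acc =
      (let st := ps.foldl (wrapB_step' length spaces) (acc, pfx, true)
       st.1 ++ [pvFinal afterR st.2.1]) := by
  intro n
  induction n with
  | zero => intro ps hlen hne; cases ps <;> simp_all
  | succ n ih =>
    intro ps hlen hne pfx acc
    match ps with
    | p :: rest =>
      have hfirst : wrapB_step' length spaces (acc, pfx, true) p = (acc, pfx ++ p, false) := by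
        simp [wrapB_step']
      rw [List.foldl_cons, hfirst, wrapB_fold_of_inner]
      rw [wrapA_outer]
      by_cases hemp : (wrapA_inner length (pfx ++ p) rest).2 = []
      · simp only [hemp, if_pos]
        rfl
      · simp only [hemp, if_neg, not_false_iff]
        have hlt : (wrapA_inner length (pfx ++ p) rest).2.length ≤ n := by
          have := wrapA_inner_len length (pfx ++ p) rest
          simp only [List.length_cons] at hlen
          omega
        exact ih _ hlt hemp spaces _

-- splitOn never returns the empty list
theorem splitOn_go_len (sep : List Char) :
    ∀ (fuel : ℕ) (l cur : List Char) (acc : List (List Char)),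
    acc.length < (PySem.Chars.splitOn.go sep fuel l cur acc).length := by
  intro fuel
  induction fuel with
  | zero => intro l cur acc; simp [PySem.Chars.splitOn.go]
  | succ fuel ih =>
    intro l cur acc
    cases l with
    | nil => simp [PySem.Chars.splitOn.go]
    | cons c rest =>
      rw [PySem.Chars.splitOn.go]
      split
      · have := ih (List.drop sep.length (c :: rest)) [] (cur.reverse :: acc)
        simp only [List.length_cons] at this
        omega
      · exact ih rest (c :: cur) acc

theorem splitOn_ne_nil (cs sep : List Char) : PySem.Chars.splitOn cs sep ≠ [] := by
  have := splitOn_go_len sep (cs.length + 1) cs [] []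
  unfold PySem.Chars.splitOn
  intro h
  rw [h] at this
  simp at this

-- each line contributes the same wrapped lines in A and B
theorem wrap_line_eq (length : Int) (line : List Char) :
    wrapA_line length line = wrapB_line length line := by
  have hfold : ∀ (spaces : List Char) (xs : List (List Char))
      (st : List (List Char) × List Char × Bool),
      xs.foldl (wrapB_step length spaces) st
        = (xs.map pvTok).foldl (wrapB_step' length spaces) st := by
    intro spaces xs st
    rw [List.foldl_map]
    rfl
  have hne : ((PySem.Chars.splitOn (pvPartCh (pvPartCh line '(').2.2 ')').1 [',']).map pvTok) ≠ [] := by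
    simp [splitOn_ne_nil]
  unfold wrapA_line wrapB_line
  dsimp only
  split_ifs with h1 h2 h3 h4
  · rfl
  · rfl
  · rfl
  all_goals rw [hfold, wrapAB_core length _ _ _ _ (le_refl _) hne]
  all_goals simp only [pvFinal]

-- ===== VERDICT (by name: the statement is the Claim_ definition above) =====
theorem wrap_declarations_spec : Claim_equal_wrap_declarations := by
  intro text length _
  unfold Spec_wrap_declarations wrap_declarations wrap_declarations_alt
  have h : (fun (acc : List (List Char)) line => acc ++ wrapA_line length line) =
      (fun acc line => acc ++ wrapB_line length line) := by
    funext acc line; rw [wrap_line_eq]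
  rw [h]
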